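-- pv_equiv track=rewrite | github.com/Paururo/myco_ge | closed_percentages/get_matrix.py | compare_alignment
-- ===== SOURCE A (Python) =====
-- from typing import List, Tuple, Optional, Dict
--
-- def compare_alignment(a: str, b: str) -> Tuple[int, int, int, int]:
--     g = l = m = 0
--     if len(a) != len(b):
--         raise ValueError(f"Longitudes desiguales: {len(a)} vs {len(b)}")
--     for x, y in zip(a, b):
--         if x == y: continue
--         if x == '-' and y != '-': g += 1
--         elif x != '-' and y == '-': l += 1
--         else: m += 1
--     return g, l, m, g + l + m
-- ===== SOURCE B (Python) =====
-- def compare_alignment(a: str, b: str):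
--     if len(a) != len(b):
--         raise ValueError(f"Longitudes desiguales: {len(a)} vs {len(b)}")
--     hist = {}
--     for p in zip(a, b):
--         hist[p] = hist.get(p, 0) + 1
--     g = l = total = 0
--     for (x, y), n in hist.items():
--         if x == y:
--             continue
--         total += n
--         if x == '-':
--             g += n
--         elif y == '-':
--             l += n
--     return g, l, total - g - l, total
-- ===== Notes on version B (the rewrite author's own statement) =====
-- stated objective: alternative
-- what changed: Instead of classifying every position in one branch-cascade loop, B builds a dict histogram of character pairs and classifies each DISTINCT pair once, weighting by its frequency; the mismatch count is derived by subtraction total - g - l.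
import Mathlib
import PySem

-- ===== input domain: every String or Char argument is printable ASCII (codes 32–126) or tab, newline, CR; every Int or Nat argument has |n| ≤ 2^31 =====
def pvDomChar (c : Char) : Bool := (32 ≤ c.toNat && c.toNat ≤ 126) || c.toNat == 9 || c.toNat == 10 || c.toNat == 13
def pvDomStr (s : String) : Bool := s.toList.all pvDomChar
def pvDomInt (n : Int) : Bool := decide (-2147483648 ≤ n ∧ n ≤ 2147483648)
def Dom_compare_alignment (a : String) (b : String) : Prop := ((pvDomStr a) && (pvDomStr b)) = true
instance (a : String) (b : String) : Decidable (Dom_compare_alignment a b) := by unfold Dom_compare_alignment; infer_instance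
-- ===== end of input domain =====

-- B replaces A's per-position branch-cascade loop by a dict histogram of character pairs, classifying each distinct pair once with its frequency and deriving the mismatch count by subtraction (alternative decomposition, same cost).


-- ===== PORT A =====
-- literal transliteration of A: one fold over zip(a,b) with state (g,l,m), branch cascade per position
def compare_alignment (a : String) (b : String) : Int × Int × Int × Int :=
  let st : Int × Int × Int :=
    (a.toList.zip b.toList).foldl
      (fun (s : Int × Int × Int) (p : Char × Char) =>
        if p.1 == p.2 then s
        else if p.1 == '-' && p.2 != '-' then (s.1 + 1, s.2.1, s.2.2)
        else if p.1 != '-' && p.2 == '-' then (s.1, s.2.1 + 1, s.2.2)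
        else (s.1, s.2.1, s.2.2 + 1))
      (0, 0, 0)
  (st.1, st.2.1, st.2.2, st.1 + st.2.1 + st.2.2)

-- ===== PORT B =====
-- literal transliteration of B: dict histogram of pairs (hist[p] = hist.get(p,0)+1), then one
-- classification loop over hist.items(), mismatch derived as total - g - l
def compare_alignment_alt (a : String) (b : String) : Int × Int × Int × Int :=
  let hist : PySem.Dict (Char × Char) Int :=
    (a.toList.zip b.toList).foldl (fun d p => d.insert p (d.getD p 0 + 1)) PySem.Dict.empty
  let st : Int × Int × Int :=
    hist.items.foldl
      (fun (s : Int × Int × Int) (kn : (Char × Char) × Int) =>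
        if kn.1.1 == kn.1.2 then s
        else
          let t := s.2.2 + kn.2
          if kn.1.1 == '-' then (s.1 + kn.2, s.2.1, t)
          else if kn.1.2 == '-' then (s.1, s.2.1 + kn.2, t)
          else (s.1, s.2.1, t))
      (0, 0, 0)
  (st.1, st.2.1, st.2.2 - st.1 - st.2.1, st.2.2)

-- ===== PRECONDITION & SPEC =====
-- Pre_ excludes exactly the inputs of unequal length, on which Python A raises ValueError (B raises the same error).
def Pre_compare_alignment (a : String) (b : String) : Prop := a.toList.length = b.toList.length
instance (a : String) (b : String) : Decidable (Pre_compare_alignment a b) := by unfold Pre_compare_alignment; infer_instance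
def pvWitness_compare_alignment : String × String := ("A-C", "AG-")
def Spec_compare_alignment (a : String) (b : String) (out : Int × Int × Int × Int) : Prop := out = compare_alignment_alt a b
instance (a : String) (b : String) (out : Int × Int × Int × Int) : Decidable (Spec_compare_alignment a b out) := by unfold Spec_compare_alignment; infer_instance

-- ===== CLAIM (what is proved, stated in full; the proofs are below) =====
def Claim_equal_compare_alignment : Prop := ∀ (a : String) (b : String), Dom_compare_alignment a b → Pre_compare_alignment a b → Spec_compare_alignment a b (compare_alignment a b)

-- ===== LEMMAS AND PROOFS =====

-- A's loop counts the three disjoint classes of differing positions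
theorem compare_alignment_fold (zs : List (Char × Char)) (g l m : Int) :
    zs.foldl
      (fun (s : Int × Int × Int) (p : Char × Char) =>
        if p.1 == p.2 then s
        else if p.1 == '-' && p.2 != '-' then (s.1 + 1, s.2.1, s.2.2)
        else if p.1 != '-' && p.2 == '-' then (s.1, s.2.1 + 1, s.2.2)
        else (s.1, s.2.1, s.2.2 + 1))
      (g, l, m)
    = (g + (zs.countP (fun p => p.1 == '-' && p.2 != '-') : Int),
       l + (zs.countP (fun p => p.1 != '-' && p.2 == '-') : Int),
       m + ((zs.countP (fun p => p.1 != p.2) : Int)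
            - (zs.countP (fun p => p.1 == '-' && p.2 != '-') : Int)
            - (zs.countP (fun p => p.1 != '-' && p.2 == '-') : Int))) := by
  induction zs generalizing g l m with
  | nil => simp
  | cons p zs ih =>
    by_cases h1 : p.1 == p.2
    · have e1 : (p.1 == '-' && p.2 != '-') = false := by
        cases hb : p.1 == '-' <;> simp_all [bne]
      have e2 : (p.1 != '-' && p.2 == '-') = false := by
        cases hb : p.2 == '-' <;> simp_all [bne]
      have e3 : (p.1 != p.2) = false := by simp_all [bne]
      rw [List.foldl_cons]
      simp only [h1, if_pos]
      rw [ih]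
      simp [e1, e2, e3]
    · have h1' : (p.1 == p.2) = false := by simp_all
      have e3 : (p.1 != p.2) = true := by simp_all [bne]
      by_cases h2 : (p.1 == '-' && p.2 != '-') = true
      · have e2 : (p.1 != '-' && p.2 == '-') = false := by
          simp [bne] at h2 ⊢; intro hc; simp [h2.1] at hc
        rw [List.foldl_cons]
        simp only [h1', h2, Bool.false_eq_true, if_false, if_true]
        rw [ih]
        simp only [List.countP_cons, h2, e2, e3, Bool.false_eq_true, if_true, if_false, Prod.mk.injEq]
        push_cast
        refine ⟨by ring, by ring, by ring⟩
      · have h2' : (p.1 == '-' && p.2 != '-') = false := by simp_all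
        by_cases h3 : (p.1 != '-' && p.2 == '-') = true
        · rw [List.foldl_cons]
          simp only [h1', h2', h3, Bool.false_eq_true, if_false, if_true]
          rw [ih]
          simp only [List.countP_cons, h2', h3, e3, Bool.false_eq_true, if_true, if_false, Prod.mk.injEq]
          push_cast
          refine ⟨by ring, by ring, by ring⟩
        · have h3' : (p.1 != '-' && p.2 == '-') = false := by simp_all
          rw [List.foldl_cons]
          simp only [h1', h2', h3', Bool.false_eq_true, if_false]
          rw [ih]
          simp only [List.countP_cons, h2', h3', e3, Bool.false_eq_true, if_true, if_false, Prod.mk.injEq]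
          push_cast
          refine ⟨by ring, by ring, by ring⟩

-- B's classification loop accumulates three weighted sums over its input list
theorem compare_alignment_alt_fold (ys : List ((Char × Char) × Int)) (g l t : Int) :
    ys.foldl
      (fun (s : Int × Int × Int) (kn : (Char × Char) × Int) =>
        if kn.1.1 == kn.1.2 then s
        else
          let tt := s.2.2 + kn.2
          if kn.1.1 == '-' then (s.1 + kn.2, s.2.1, tt)
          else if kn.1.2 == '-' then (s.1, s.2.1 + kn.2, tt)
          else (s.1, s.2.1, tt))
      (g, l, t)
    = (g + (ys.map (fun kn => if kn.1.1 == kn.1.2 then 0 else if kn.1.1 == '-' then kn.2 else 0)).sum,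
       l + (ys.map (fun kn => if kn.1.1 == kn.1.2 then 0 else if kn.1.1 == '-' then 0
                    else if kn.1.2 == '-' then kn.2 else 0)).sum,
       t + (ys.map (fun kn => if kn.1.1 == kn.1.2 then 0 else kn.2)).sum) := by
  induction ys generalizing g l t with
  | nil => simp
  | cons kn ys ih =>
    rw [List.foldl_cons, List.map_cons, List.map_cons, List.map_cons,
      List.sum_cons, List.sum_cons, List.sum_cons]
    by_cases h1 : kn.1.1 == kn.1.2
    · simp only [h1, if_true]
      rw [ih]
      refine Prod.ext (by ring) (Prod.ext (by ring) (by ring))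
    · have h1' : (kn.1.1 == kn.1.2) = false := by simp_all
      by_cases h2 : kn.1.1 == '-'
      · simp only [h1', h2, Bool.false_eq_true, if_false, if_true]
        rw [ih]
        refine Prod.ext (by ring) (Prod.ext (by ring) (by ring))
      · have h2' : (kn.1.1 == '-') = false := by simp_all
        by_cases h3 : kn.1.2 == '-'
        · simp only [h1', h2', h3, Bool.false_eq_true, if_false, if_true]
          rw [ih]
          refine Prod.ext (by ring) (Prod.ext (by ring) (by ring))
        · have h3' : (kn.1.2 == '-') = false := by simp_all
          simp only [h1', h2', h3', Bool.false_eq_true, if_false]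
          rw [ih]
          refine Prod.ext (by ring) (Prod.ext (by ring) (by ring))

-- summing (count k) over the distinct elements that satisfy p gives countP p
theorem sum_ofList_count {α : Type} [BEq α] [LawfulBEq α] [DecidableEq α]
    (l : List α) (p : α → Bool) :
    ((PySem.Set.ofList l).map (fun k => if p k then (l.count k : Int) else 0)).sum
      = (l.countP p : Int) := by
  have hnd : (PySem.Set.ofList l : List α).Nodup := PySem.Set.nodup_ofList l
  have hfin : (PySem.Set.ofList l : List α).toFinset = l.toFinset := by
    ext x; simp [List.mem_toFinset, PySem.Set.mem_ofList]
  rw [← List.sum_toFinset _ hnd, hfin]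
  have step1 : ∀ k : α, (if p k then (l.count k : Int) else 0)
      = (((l.filter p).count k : Nat) : Int) := by
    intro k
    by_cases hp : p k = true
    · rw [if_pos hp, List.count_filter hp]
    · rw [if_neg hp, List.count_eq_zero.mpr]
      · simp
      · intro hmem
        exact hp (List.of_mem_filter hmem)
  calc (∑ k ∈ l.toFinset, if p k then (l.count k : Int) else 0)
      = ∑ k ∈ l.toFinset, (((l.filter p).count k : Nat) : Int) := by
        exact Finset.sum_congr rfl (fun k _ => step1 k)
    _ = ((∑ k ∈ l.toFinset, (l.filter p).count k : Nat) : Int) := by push_cast; ring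
    _ = (l.countP p : Int) := by
        congr 1
        have hsub : (l.filter p).toFinset ⊆ l.toFinset := by
          intro x hx
          rw [List.mem_toFinset] at hx ⊢
          exact List.mem_of_mem_filter hx
        rw [← Finset.sum_subset hsub
            (fun x _ hx => List.count_eq_zero.mpr (fun hm => hx (List.mem_toFinset.mpr hm)))]
        rw [List.countP_eq_length_filter]
        have hcount : ∀ (x : α) (m : List α),
            List.count x m = @List.count α instBEqOfDecidableEq x m := by
          intro x m
          induction m with
          | nil => rfl
          | cons a m ih => by_cases h : a = x <;> simp [h, ih]
        simp only [hcount]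
        exact List.sum_toFinset_count_eq_length (l.filter p)

theorem countP_gap (zs : List (Char × Char)) :
    zs.countP (fun p => !(p.1 == p.2) && p.1 == '-')
      = zs.countP (fun p => p.1 == '-' && p.2 != '-') := by
  apply List.countP_congr
  rintro ⟨x, y⟩ _
  have h : ((!(x == y)) && x == '-') = ((x == '-') && (y != '-')) := by
    by_cases hx : x = '-'
    · subst hx
      by_cases hy : y = '-'
      · subst hy; simp
      · have h2 : (y == '-') = false := by simp [hy]
        have h3 : ('-' == y) = false := beq_eq_false_iff_ne.mpr (Ne.symm hy)
        simp [h2, h3, bne]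
    · have h1 : (x == '-') = false := by simp [hx]
      simp [h1, bne]
  rw [h]

theorem countP_loss (zs : List (Char × Char)) :
    zs.countP (fun p => !(p.1 == p.2) && !(p.1 == '-') && p.2 == '-')
      = zs.countP (fun p => p.1 != '-' && p.2 == '-') := by
  apply List.countP_congr
  rintro ⟨x, y⟩ _
  have h : ((!(x == y)) && !(x == '-') && (y == '-')) = ((x != '-') && (y == '-')) := by
    by_cases hy : y = '-'
    · subst hy
      by_cases hx : x = '-'
      · subst hx; simp
      · have h1 : (x == '-') = false := by simp [hx]
        simp [h1, bne]
    · have h2 : (y == '-') = false := by simp [hy]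
      simp [h2, bne]
  rw [h]

-- ===== VERDICT (by name: the statement is the Claim_ definition above) =====
theorem compare_alignment_spec : Claim_equal_compare_alignment := by
  intro a b _ _
  unfold Spec_compare_alignment compare_alignment compare_alignment_alt
  simp only [PySem.Dict.foldl_insert_getD_add_one_eq_counter, PySem.Dict.items_counter]
  rw [compare_alignment_fold, compare_alignment_alt_fold]
  rw [List.map_map, List.map_map, List.map_map]
  have e1 : ((PySem.Set.ofList (a.toList.zip b.toList)).map
      ((fun kn : (Char × Char) × Int =>
          if kn.1.1 == kn.1.2 then 0 else if kn.1.1 == '-' then kn.2 else 0) ∘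
        fun k => (k, ((a.toList.zip b.toList).count k : Int)))).sum
      = ((a.toList.zip b.toList).countP (fun p => p.1 == '-' && p.2 != '-') : Int) := by
    rw [← countP_gap, ← sum_ofList_count]
    apply congrArg
    apply List.map_congr_left
    intro k _
    by_cases hc1 : k.1 == k.2 <;> by_cases hc2 : k.1 == '-' <;>
      simp [Function.comp, hc1, hc2]
  have e2 : ((PySem.Set.ofList (a.toList.zip b.toList)).map
      ((fun kn : (Char × Char) × Int =>
          if kn.1.1 == kn.1.2 then 0 else if kn.1.1 == '-' then 0
          else if kn.1.2 == '-' then kn.2 else 0) ∘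
        fun k => (k, ((a.toList.zip b.toList).count k : Int)))).sum
      = ((a.toList.zip b.toList).countP (fun p => p.1 != '-' && p.2 == '-') : Int) := by
    rw [← countP_loss, ← sum_ofList_count]
    apply congrArg
    apply List.map_congr_left
    intro k _
    by_cases hc1 : k.1 == k.2 <;> by_cases hc2 : k.1 == '-' <;> by_cases hc3 : k.2 == '-' <;>
      simp [Function.comp, hc1, hc2, hc3]
  have e3 : ((PySem.Set.ofList (a.toList.zip b.toList)).map
      ((fun kn : (Char × Char) × Int =>
          if kn.1.1 == kn.1.2 then 0 else kn.2) ∘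
        fun k => (k, ((a.toList.zip b.toList).count k : Int)))).sum
      = ((a.toList.zip b.toList).countP (fun p => p.1 != p.2) : Int) := by
    have hp : ((a.toList.zip b.toList).countP (fun p => !(p.1 == p.2)))
        = ((a.toList.zip b.toList).countP (fun p => p.1 != p.2)) := by
      apply List.countP_congr
      intro p _
      simp [bne]
    rw [← hp, ← sum_ofList_count]
    apply congrArg
    apply List.map_congr_left
    intro k _
    by_cases hc1 : k.1 == k.2 <;> simp [Function.comp, hc1]
  rw [e1, e2, e3]
  refine Prod.ext (by ring) (Prod.ext (by ring) (Prod.ext (by ring) (by ring)))
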